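-- pv_equiv track=rewrite | github.com/wludin99/6.009 | lab2/lab.py | get_actors_with_bacon_number
-- ===== SOURCE A (Python) =====
-- def make_data_dict(data):
--     db = {}
--     for datum in data:
--         if datum[0] in db:
--             db[datum[0]].add(datum[1])
--         else:
--             db[datum[0]] = {datum[1]}
--         if datum[1] in db:
--             db[datum[1]].add(datum[0])
--         else:
--             db[datum[1]] = {datum[0]}
--     return db
--
-- def add_new_level(db, actors, backtrack):
--     '''
--     takes db dictionary, set of actors in previous level, and parent pointer dictionary,
--     returns tuple (new_level, updated dictionary)
--     '''
--     level = set()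
--     d = {}
--     for actor in actors:
--         for child in db[actor]:
--             if child not in backtrack:
--                 backtrack[child] = actor
--                 level.add(child)
--     return (level, backtrack)
--
-- def get_actors_with_bacon_number(data, n):
--     db = make_data_dict(data)
--     actors = {4724}
--     backtrack = {4724:None}
--     i = 0
--     while i < n:
--         actors, backtrack = add_new_level(db, actors, backtrack)
--         i += 1
--     return actors
-- ===== SOURCE B (Python) =====
-- from collections import deque
--
-- def get_actors_with_bacon_number(data, n):
--     db = {}
--     for a, b in data:
--         db.setdefault(a, set()).add(b)
--         db.setdefault(b, set()).add(a)
--     dist = {4724: 0}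
--     queue = deque([4724])
--     while queue:
--         actor = queue.popleft()
--         if dist[actor] < n:
--             for child in db[actor]:
--                 if child not in dist:
--                     dist[child] = dist[actor] + 1
--                     queue.append(child)
--     # distances recorded never exceed n, so this is the depth-n set
--     # (for n <= 0 the BFS never expands and only the seed qualifies)
--     return {a for a, d in dist.items() if d >= n}
-- ===== Notes on version B (the rewrite author's own statement) =====
-- stated objective: idiomatic
-- what changed: Replaces A's n staged level-expansion rounds (helper add_new_level rebuilding a frontier set and parent-pointer dict each round) by the textbook single-queue BFS: one deque and one distance dict seeded {4724:0}, expanding a popped actor only while its distance is below n, then returning the keys whose distance reached n (recorded distances never exceed n, and for n <= 0 only the seed exists).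
import Mathlib
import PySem

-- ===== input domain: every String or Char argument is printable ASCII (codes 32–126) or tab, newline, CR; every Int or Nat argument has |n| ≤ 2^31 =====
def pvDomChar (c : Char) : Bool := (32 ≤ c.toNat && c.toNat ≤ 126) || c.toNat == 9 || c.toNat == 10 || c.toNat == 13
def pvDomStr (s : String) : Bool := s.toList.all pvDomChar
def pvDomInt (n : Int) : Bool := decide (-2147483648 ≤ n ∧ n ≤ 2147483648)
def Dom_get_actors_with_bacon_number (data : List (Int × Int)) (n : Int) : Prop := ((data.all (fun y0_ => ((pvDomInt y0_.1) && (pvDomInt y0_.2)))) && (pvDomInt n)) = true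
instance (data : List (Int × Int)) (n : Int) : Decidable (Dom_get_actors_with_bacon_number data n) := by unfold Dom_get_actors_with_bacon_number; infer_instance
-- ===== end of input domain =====

-- B replaces A's n staged level-expansion rounds (frontier set + parent-pointer dict rebuilt
-- per round) by the textbook single-queue BFS with a distance dict, keeping the keys whose
-- distance reached n at the end (objective: idiomatic).

-- ===== PORT A =====
def pvMakeDataDict (data : List (Int × Int)) : PySem.Dict Int (PySem.Set Int) :=
  data.foldl (fun db datum =>
    let db :=
      if db.contains datum.1 then db.modify datum.1 PySem.Set.empty (fun s => s.add datum.2)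
      else db.insert datum.1 (PySem.Set.ofList [datum.2])
    if db.contains datum.2 then db.modify datum.2 PySem.Set.empty (fun s => s.add datum.1)
    else db.insert datum.2 (PySem.Set.ofList [datum.1])) PySem.Dict.empty

-- A's add_new_level also creates a local dict `d = {}` that is never used; it is dropped here.
-- `db[actor]` is `db.getD actor ∅`: the default is reached exactly where Python raises KeyError,
-- excluded by Pre_ below.
def pvAddNewLevel (db : PySem.Dict Int (PySem.Set Int)) (actors : PySem.Set Int)
    (backtrack : PySem.Dict Int (Option Int)) : PySem.Set Int × PySem.Dict Int (Option Int) :=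
  actors.foldl (fun st actor =>
    (db.getD actor PySem.Set.empty).foldl (fun st child =>
      if st.2.contains child then st
      else (st.1.add child, st.2.insert child (some actor))) st)
    (PySem.Set.empty, backtrack)

-- the `while i < n` counting loop runs n.toNat times = once per element of range(n)
def get_actors_with_bacon_number (data : List (Int × Int)) (n : Int) : List Int :=
  let db := pvMakeDataDict data
  let st := (PySem.List.pyRange 0 n 1).foldl
    (fun st _ => pvAddNewLevel db st.1 st.2)
    (PySem.Set.ofList [4724], (PySem.Dict.empty : PySem.Dict Int (Option Int)).insert 4724 none)
  st.1

-- ===== PORT B =====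
def pvAltDb (data : List (Int × Int)) : PySem.Dict Int (PySem.Set Int) :=
  data.foldl (fun db p =>
    let db := (db.setdefault p.1 PySem.Set.empty).modify p.1 PySem.Set.empty (fun s => s.add p.2)
    (db.setdefault p.2 PySem.Set.empty).modify p.2 PySem.Set.empty (fun s => s.add p.1))
    PySem.Dict.empty

-- the `while queue:` loop of Source B; the fuel argument only makes the recursion structural:
-- each iteration pops one element and 2*|data|+2 exceeds the number of pops (each popped
-- actor was enqueued once, and enqueued actors are distinct keys of `dist`).
-- `dist[actor]` / `db[actor]` are `getD … 0` / `getD … ∅`: the defaults are reached only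
-- where Python raises KeyError (excluded by Pre_; `dist[actor]` never misses).
def pvBfs (db : PySem.Dict Int (PySem.Set Int)) (n : Int) :
    Nat → List Int → PySem.Dict Int Int → PySem.Dict Int Int
  | 0, _, dist => dist
  | _ + 1, [], dist => dist
  | fuel + 1, actor :: queue, dist =>
      if dist.getD actor 0 < n then
        let st := (db.getD actor PySem.Set.empty).foldl
          (fun st child =>
            if st.2.contains child then st
            else (st.1 ++ [child], st.2.insert child (st.2.getD actor 0 + 1)))
          (queue, dist)
        pvBfs db n fuel st.1 st.2
      else pvBfs db n fuel queue dist

def get_actors_with_bacon_number_alt (data : List (Int × Int)) (n : Int) : List Int :=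
  let db := pvAltDb data
  let dist := pvBfs db n (2 * data.length + 2) [4724]
      ((PySem.Dict.empty : PySem.Dict Int Int).insert 4724 0)
  PySem.Set.ofList ((dist.items.filter (fun p => p.2 ≥ n)).map (fun p => p.1))

-- ===== PRECONDITION & SPEC =====
-- Pre_ excludes exactly the inputs on which the Python A raises KeyError:
-- n ≥ 1 while 4724 appears in no pair of data (then db[4724] fails on the first level).
def Pre_get_actors_with_bacon_number (data : List (Int × Int)) (n : Int) : Prop :=
  n ≤ 0 ∨ ∃ p ∈ data, p.1 = 4724 ∨ p.2 = 4724
instance (data : List (Int × Int)) (n : Int) : Decidable (Pre_get_actors_with_bacon_number data n) := by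
  unfold Pre_get_actors_with_bacon_number; infer_instance
def pvWitness_get_actors_with_bacon_number : (List (Int × Int)) × Int := ([(4724, 1), (1, 2)], 2)

def Spec_get_actors_with_bacon_number (data : List (Int × Int)) (n : Int) (out : List Int) : Prop := out = get_actors_with_bacon_number_alt data n
instance (data : List (Int × Int)) (n : Int) (out : List Int) : Decidable (Spec_get_actors_with_bacon_number data n out) := by unfold Spec_get_actors_with_bacon_number; infer_instance

-- ===== CLAIM (what is proved, stated in full; the proofs are below) =====
def Claim_equal_get_actors_with_bacon_number : Prop := ∀ (data : List (Int × Int)) (n : Int), Dom_get_actors_with_bacon_number data n → Pre_get_actors_with_bacon_number data n → Spec_get_actors_with_bacon_number data n (get_actors_with_bacon_number data n)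

-- ===== LEMMAS AND PROOFS =====

-- The two adjacency-dict builders perform identical updates.
theorem pvDbStep_eq (db : PySem.Dict Int (PySem.Set Int)) (k v : Int) :
    (db.setdefault k PySem.Set.empty).modify k PySem.Set.empty (fun s => s.add v)
      = if db.contains k then db.modify k PySem.Set.empty (fun s => s.add v)
        else db.insert k (PySem.Set.ofList [v]) := by
  by_cases h : db.contains k = true
  · rw [PySem.Dict.setdefault_of_contains db _ h, if_pos h]
  · have h' : db.contains k = false := by simpa using h
    rw [PySem.Dict.setdefault_of_not_contains db _ h', if_neg h]
    show ((db.insert k PySem.Set.empty).insert k _) = _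
    rw [PySem.Dict.getD_insert_self, PySem.Dict.insert_insert_self]
    rfl

theorem pvAltDb_eq (data : List (Int × Int)) : pvAltDb data = pvMakeDataDict data := by
  unfold pvAltDb pvMakeDataDict
  congr 1
  funext db p
  simp only [pvDbStep_eq]

-- a foldl that ignores the list elements is an iterate of its step
theorem pvFoldl_const {α β : Type} (g : α → α) (L : List β) (s : α) :
    L.foldl (fun st _ => g st) s = g^[L.length] s := by
  induction L generalizing s with
  | nil => rfl
  | cons x L ih => simpa [Function.iterate_succ_apply] using ih (g s)

-- every neighbour stored by make_data_dict's update step was already stored or is the new value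
theorem pvDbUpdMem (db : PySem.Dict Int (PySem.Set Int)) (k v a c : Int)
    (h : c ∈ (if db.contains k then db.modify k PySem.Set.empty (fun s => s.add v)
        else db.insert k (PySem.Set.ofList [v])).getD a PySem.Set.empty) :
    c ∈ db.getD a PySem.Set.empty ∨ c = v := by
  split_ifs at h with hc
  · rw [PySem.Dict.getD_modify] at h
    split_ifs at h with ha
    · rcases (PySem.Set.mem_add _ _ _).mp h with h' | h'
      · subst ha; exact Or.inl h'
      · exact Or.inr h'
    · exact Or.inl h
  · rw [PySem.Dict.getD_insert] at h
    split_ifs at h with ha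
    · have := (PySem.Set.mem_ofList _ _).mp h
      simp only [List.mem_singleton] at this
      exact Or.inr this
    · exact Or.inl h

-- all neighbour values of the adjacency dict are endpoints of data
theorem pvDbSub (N : List Int) :
    ∀ (data : List (Int × Int)) (db : PySem.Dict Int (PySem.Set Int)),
    (∀ p ∈ data, p.1 ∈ N ∧ p.2 ∈ N) →
    (∀ a c, c ∈ db.getD a PySem.Set.empty → c ∈ N) →
    ∀ a c, c ∈ (data.foldl (fun db datum =>
      let db :=
        if db.contains datum.1 then db.modify datum.1 PySem.Set.empty (fun s => s.add datum.2)
        else db.insert datum.1 (PySem.Set.ofList [datum.2])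
      if db.contains datum.2 then db.modify datum.2 PySem.Set.empty (fun s => s.add datum.1)
      else db.insert datum.2 (PySem.Set.ofList [datum.1])) db).getD a PySem.Set.empty → c ∈ N := by
  intro data
  induction data with
  | nil => intro db _ hdb a c hc; exact hdb a c hc
  | cons p data ih =>
    intro db hp hdb a c hc
    refine ih _ (fun q hq => hp q (List.mem_cons_of_mem _ hq)) ?_ a c hc
    intro a' c' hc'
    rcases pvDbUpdMem _ _ _ _ _ hc' with h' | h'
    · rcases pvDbUpdMem _ _ _ _ _ h' with h'' | h''
      · exact hdb a' c' h''
      · exact h'' ▸ (hp p (List.mem_cons_self)).2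
    · exact h' ▸ (hp p (List.mem_cons_self)).1

theorem pvMakeDataDict_sub (data : List (Int × Int)) (a c : Int)
    (h : c ∈ (pvMakeDataDict data).getD a PySem.Set.empty) :
    c ∈ data.flatMap (fun p => [p.1, p.2]) := by
  refine pvDbSub _ data PySem.Dict.empty ?_ ?_ a c h
  · intro p hp
    constructor <;> exact List.mem_flatMap.mpr ⟨p, hp, by simp⟩
  · intro a c hc
    simp [PySem.Dict.getD_empty, PySem.Set.empty] at hc

theorem pvFlatMap_len (data : List (Int × Int)) :
    (data.flatMap (fun p => [(p.1 : Int), p.2])).length = 2 * data.length := by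
  induction data with
  | nil => rfl
  | cons p data ih => simp [List.flatMap_cons, ih]; omega

-- ===== the child loop: A's inner fold over db[actor] versus B's inner fold =====
theorem pvInner (a d : Int) (N : List Int) (cs : List Int) (hcs : ∀ c ∈ cs, c ∈ N) :
    ∀ (level : PySem.Set Int) (bt : PySem.Dict Int (Option Int)) (q : List Int)
      (dist : PySem.Dict Int Int),
    dist.keys = bt.keys → dist.keys.Nodup → (∀ x ∈ level, x ∈ bt.keys) →
    dist.get? a = some d →
    ∃ new : List Int,
      (cs.foldl (fun st child => if st.2.contains child then st
          else (st.1.add child, st.2.insert child (some a))) (level, bt)).1 = level ++ new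
      ∧ (cs.foldl (fun st child => if st.2.contains child then st
          else (st.1.add child, st.2.insert child (some a))) (level, bt)).2.keys = bt.keys ++ new
      ∧ (cs.foldl (fun st child => if st.2.contains child then st
          else (st.1 ++ [child], st.2.insert child (st.2.getD a 0 + 1))) (q, dist)).1 = q ++ new
      ∧ (cs.foldl (fun st child => if st.2.contains child then st
          else (st.1 ++ [child], st.2.insert child (st.2.getD a 0 + 1))) (q, dist)).2.items
          = dist.items ++ new.map (fun c => (c, d + 1))
      ∧ (cs.foldl (fun st child => if st.2.contains child then st
          else (st.1 ++ [child], st.2.insert child (st.2.getD a 0 + 1))) (q, dist)).2.keys.Nodup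
      ∧ (∀ c ∈ new, c ∈ N) := by
  induction cs with
  | nil =>
    intro level bt q dist hk hnd _ _
    exact ⟨[], by simp, by simp [hk.symm], by simp, by simp, by simpa using hnd, by simp⟩
  | cons c cs ih =>
    intro level bt q dist hk hnd hl hv
    have hcc : dist.contains c = bt.contains c := by
      rw [PySem.Dict.contains_eq_decide_mem_keys, PySem.Dict.contains_eq_decide_mem_keys, hk]
    by_cases hc : c ∈ dist.keys
    · have h1 : dist.contains c = true := by
        rw [PySem.Dict.contains_eq_decide_mem_keys]; simpa using hc
      have h2 : bt.contains c = true := hcc ▸ h1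
      have eA : (c :: cs).foldl (fun st child => if st.2.contains child then st
          else (st.1.add child, st.2.insert child (some a))) (level, bt)
          = cs.foldl (fun st child => if st.2.contains child then st
          else (st.1.add child, st.2.insert child (some a))) (level, bt) := by
        simp [List.foldl_cons, h2]
      have eB : (c :: cs).foldl (fun st child => if st.2.contains child then st
          else (st.1 ++ [child], st.2.insert child (st.2.getD a 0 + 1))) (q, dist)
          = cs.foldl (fun st child => if st.2.contains child then st
          else (st.1 ++ [child], st.2.insert child (st.2.getD a 0 + 1))) (q, dist) := by
        simp [List.foldl_cons, h1]
      rw [eA, eB]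
      exact ih (fun x hx => hcs x (List.mem_cons_of_mem _ hx)) level bt q dist hk hnd hl hv
    · have h1 : dist.contains c = false := by
        rw [PySem.Dict.contains_eq_decide_mem_keys]; simpa using hc
      have h2 : bt.contains c = false := hcc ▸ h1
      have ha : a ∈ dist.keys := by
        by_contra hmem
        rw [← PySem.Dict.get?_eq_none_iff_not_mem_keys] at hmem
        simp [hmem] at hv
      have hac : a ≠ c := fun h => hc (h ▸ ha)
      have hcl : c ∉ level := fun h => hc (hk ▸ hl c h)
      have hgd : dist.getD a 0 = d := by
        rw [PySem.Dict.getD_eq_get?_getD, hv]; rfl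
      have hkb : (dist.insert c (d + 1)).keys = dist.keys ++ [c] :=
        PySem.Dict.keys_insert_of_not_contains _ _ h1
      have hka : (bt.insert c (some a)).keys = bt.keys ++ [c] :=
        PySem.Dict.keys_insert_of_not_contains _ _ h2
      have hib : (dist.insert c (d + 1)).items = dist.items ++ [(c, d + 1)] :=
        PySem.Dict.items_insert_of_not_contains _ _ h1
      have eA : (c :: cs).foldl (fun st child => if st.2.contains child then st
          else (st.1.add child, st.2.insert child (some a))) (level, bt)
          = cs.foldl (fun st child => if st.2.contains child then st
          else (st.1.add child, st.2.insert child (some a))) (level.add c, bt.insert c (some a)) := by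
        simp [List.foldl_cons, h2]
      have eB : (c :: cs).foldl (fun st child => if st.2.contains child then st
          else (st.1 ++ [child], st.2.insert child (st.2.getD a 0 + 1))) (q, dist)
          = cs.foldl (fun st child => if st.2.contains child then st
          else (st.1 ++ [child], st.2.insert child (st.2.getD a 0 + 1))) (q ++ [c], dist.insert c (d + 1)) := by
        simp [List.foldl_cons, h1, hgd]
      obtain ⟨new, g1, g2, g3, g4, g5, g6⟩ :=
        ih (fun x hx => hcs x (List.mem_cons_of_mem _ hx))
          (level.add c) (bt.insert c (some a)) (q ++ [c]) (dist.insert c (d + 1))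
          (by rw [hkb, hka, hk])
          (by rw [hkb]
              exact List.Nodup.append hnd (List.nodup_singleton c)
                (by simpa [List.disjoint_singleton] using hc))
          (by intro x hx
              rw [hka]
              rw [PySem.Set.add_of_not_mem hcl] at hx
              rcases List.mem_append.mp hx with h | h
              · exact List.mem_append_left _ (hl x h)
              · exact List.mem_append_right _ h)
          (by rw [PySem.Dict.get?_insert_of_ne _ _ hac, hv])
      refine ⟨c :: new, ?_, ?_, ?_, ?_, by rw [eB]; exact g5, ?_⟩
      · rw [eA, g1, PySem.Set.add_of_not_mem hcl, List.append_assoc, List.singleton_append]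
      · rw [eA, g2, hka, List.append_assoc, List.singleton_append]
      · rw [eB, g3, List.append_assoc, List.singleton_append]
      · rw [eB, g4, hib, List.append_assoc, List.singleton_append, List.map_cons]
      · intro x hx
        rcases List.mem_cons.mp hx with h | h
        · exact h ▸ hcs c List.mem_cons_self
        · exact g6 x h

-- ===== one whole level: pvBfs consuming the frontier F versus A's fold over F =====
theorem pvOuter (db : PySem.Dict Int (PySem.Set Int)) (n d : Int) (hd : d < n)
    (N : List Int) (hdb : ∀ a c, c ∈ db.getD a PySem.Set.empty → c ∈ N) (F : List Int) :
    ∀ (level : PySem.Set Int) (bt : PySem.Dict Int (Option Int)) (q : List Int)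
      (dist : PySem.Dict Int Int),
    dist.keys = bt.keys → dist.keys.Nodup → (∀ x ∈ level, x ∈ bt.keys) →
    (∀ a ∈ F, dist.get? a = some d) →
    ∃ (new : List Int) (dist' : PySem.Dict Int Int),
      (∀ f, pvBfs db n (f + F.length) (F ++ q) dist = pvBfs db n f (q ++ new) dist')
      ∧ (F.foldl (fun st actor =>
          (db.getD actor PySem.Set.empty).foldl (fun st child =>
            if st.2.contains child then st
            else (st.1.add child, st.2.insert child (some actor))) st) (level, bt)).1
          = level ++ new
      ∧ (F.foldl (fun st actor =>
          (db.getD actor PySem.Set.empty).foldl (fun st child =>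
            if st.2.contains child then st
            else (st.1.add child, st.2.insert child (some actor))) st) (level, bt)).2.keys
          = bt.keys ++ new
      ∧ dist'.items = dist.items ++ new.map (fun c => (c, d + 1))
      ∧ dist'.keys.Nodup
      ∧ (∀ c ∈ new, c ∈ N) := by
  induction F with
  | nil =>
    intro level bt q dist hk hnd hl _
    exact ⟨[], dist, fun f => by simp, by simp, by simp, by simp, hnd, by simp⟩
  | cons a F ih =>
    intro level bt q dist hk hnd hl hF
    have hva : dist.get? a = some d := hF a List.mem_cons_self
    have hgd : dist.getD a 0 = d := by rw [PySem.Dict.getD_eq_get?_getD, hva]; rfl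
    obtain ⟨new₁, g1, g2, g3, g4, g5, g6⟩ :=
      pvInner a d N (db.getD a PySem.Set.empty) (fun c hc => hdb a c hc)
        level bt (F ++ q) dist hk hnd hl hva
    set FB := (db.getD a PySem.Set.empty).foldl (fun st child =>
      if st.2.contains child then st
      else (st.1 ++ [child], st.2.insert child (st.2.getD a 0 + 1))) (F ++ q, dist) with hFB
    set AF := (db.getD a PySem.Set.empty).foldl (fun st child =>
      if st.2.contains child then st
      else (st.1.add child, st.2.insert child (some a))) (level, bt) with hAF
    have hpair : AF = (level ++ new₁, AF.2) := Prod.ext g1 rfl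
    have hk1 : FB.2.keys = dist.keys ++ new₁ := by
      simp only [PySem.Dict.keys, g4, List.map_append, List.map_map]
      simp [Function.comp_def]
    obtain ⟨new₂, dist', h1, h2, h3, h4, h5, h6⟩ :=
      ih (level ++ new₁)
        AF.2
        (q ++ new₁) FB.2
        (by rw [hk1, g2, hk])
        g5
        (by intro x hx
            rw [g2]
            rcases List.mem_append.mp hx with h | h
            · exact List.mem_append_left _ (hl x h)
            · exact List.mem_append_right _ h)
        (by intro a' ha'
            have := hF a' (List.mem_cons_of_mem _ ha')
            have hm : (a', d) ∈ dist.items := PySem.Dict.mem_items_of_get?_eq_some _ this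
            have hm' : (a', d) ∈ FB.2.items := by rw [g4]; exact List.mem_append_left _ hm
            exact PySem.Dict.get?_of_mem_items _ hm' (hk1 ▸ g5))
    refine ⟨new₁ ++ new₂, dist', ?_, ?_, ?_, ?_, h5, ?_⟩
    · intro f
      have hstep : pvBfs db n (f + (a :: F).length) ((a :: F) ++ q) dist
          = pvBfs db n (f + F.length) FB.1 FB.2 := by
        show pvBfs db n ((f + F.length) + 1) (a :: (F ++ q)) dist = _
        rw [pvBfs]
        rw [if_pos (show dist.getD a 0 < n by rw [hgd]; exact hd)]
      rw [hstep, g3, List.append_assoc, h1 f, List.append_assoc]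
    · rw [List.foldl_cons, ← hAF, hpair, h2, List.append_assoc]
    · rw [List.foldl_cons, ← hAF, hpair, h3, g2, List.append_assoc]
    · rw [h4, g4, List.append_assoc, ← List.map_append]
    · intro c hc
      rcases List.mem_append.mp hc with h | h
      · exact g6 c h
      · exact h6 c h

-- draining the queue once every entry already has distance n
theorem pvDrain (db : PySem.Dict Int (PySem.Set Int)) (n : Int) :
    ∀ (q : List Int) (dist : PySem.Dict Int Int) (f : Nat),
    (∀ a ∈ q, dist.get? a = some n) →
    pvBfs db n (f + q.length) q dist = dist := by
  intro q
  induction q with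
  | nil => intro dist f _; cases f <;> rfl
  | cons a q ih =>
    intro dist f hq
    have hgd : dist.getD a 0 = n := by
      rw [PySem.Dict.getD_eq_get?_getD, hq a List.mem_cons_self]; rfl
    show pvBfs db n ((f + q.length) + 1) (a :: q) dist = dist
    rw [pvBfs, if_neg (by rw [hgd]; simp)]
    exact ih dist f (fun x hx => hq x (List.mem_cons_of_mem _ hx))

-- ===== the main induction: r remaining rounds of A versus the rest of B's BFS =====
theorem pvLevels (db : PySem.Dict Int (PySem.Set Int)) (n : Int) (hn : 0 ≤ n)
    (N : List Int) (hdb : ∀ a c, c ∈ db.getD a PySem.Set.empty → c ∈ N) :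
    ∀ (r k : Nat), k + r = n.toNat →
    ∀ (F : List Int) (bt : PySem.Dict Int (Option Int)) (dist : PySem.Dict Int Int),
    dist.keys = bt.keys → dist.keys.Nodup →
    (∀ a ∈ F, dist.get? a = some (k : Int)) →
    (∃ low, dist.items = low ++ F.map (fun a => (a, (k : Int)))
        ∧ ∀ p ∈ low, p.2 < (k : Int)) →
    ∃ (m : Nat) (dist' : PySem.Dict Int Int),
      (∀ f, pvBfs db n (f + m) F dist = dist')
      ∧ m + dist.size = F.length + dist'.size
      ∧ dist'.keys.Nodup
      ∧ (∀ x ∈ dist'.keys, x ∈ dist.keys ∨ x ∈ N)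
      ∧ ((dist'.items.filter (fun p => p.2 ≥ n)).map (fun p => p.1))
          = ((fun st => pvAddNewLevel db st.1 st.2)^[r] (F, bt)).1 := by
  intro r
  induction r with
  | zero =>
    intro k hk F bt dist hkeys hnd hF hlow
    have hkn : (k : Int) = n := by
      have := Int.toNat_of_nonneg hn
      omega
    refine ⟨F.length, dist, ?_, by omega, hnd, fun x hx => Or.inl hx, ?_⟩
    · intro f
      exact pvDrain db n F dist f (fun a ha => hkn ▸ hF a ha)
    · obtain ⟨low, hitems, hlt⟩ := hlow
      rw [Function.iterate_zero_apply, hitems, List.filter_append, List.map_append]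
      have h1 : low.filter (fun p => p.2 ≥ n) = [] := by
        rw [List.filter_eq_nil_iff]
        intro p hp
        have := hlt p hp
        simp only [ge_iff_le, decide_eq_true_eq, not_le]
        omega
      have h2 : (F.map (fun a => (a, (k : Int)))).filter (fun p => p.2 ≥ n)
          = F.map (fun a => (a, (k : Int))) := by
        rw [List.filter_eq_self]
        intro p hp
        obtain ⟨a, _, rfl⟩ := List.mem_map.mp hp
        simp [hkn]
      rw [h1, h2, List.map_map]
      simp [Function.comp_def]
  | succ r ih =>
    intro k hk F bt dist hkeys hnd hF hlow
    have hklt : (k : Int) < n := by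
      have := Int.toNat_of_nonneg hn
      omega
    obtain ⟨new₁, dist₁, o1, o2, o3, o4, o5, o6⟩ :=
      pvOuter db n (k : Int) hklt N hdb F PySem.Set.empty bt [] dist hkeys hnd
        (by intro x hx; simp [PySem.Set.empty] at hx) hF
    have hk1 : dist₁.keys = dist.keys ++ new₁ := by
      simp only [PySem.Dict.keys, o4, List.map_append, List.map_map]
      simp [Function.comp_def]
    have hround : pvAddNewLevel db F bt
        = (new₁, (F.foldl (fun st actor =>
            (db.getD actor PySem.Set.empty).foldl (fun st child =>
              if st.2.contains child then st
              else (st.1.add child, st.2.insert child (some actor))) st)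
            (PySem.Set.empty, bt)).2) := by
      unfold pvAddNewLevel
      exact Prod.ext (by rw [o2]; simp [PySem.Set.empty]) rfl
    obtain ⟨m₂, dist', i1, i2, ind, i3, i4⟩ :=
      ih (k + 1) (by omega) new₁
        ((F.foldl (fun st actor =>
            (db.getD actor PySem.Set.empty).foldl (fun st child =>
              if st.2.contains child then st
              else (st.1.add child, st.2.insert child (some actor))) st)
            (PySem.Set.empty, bt)).2)
        dist₁
        (by rw [hk1, o3, hkeys])
        o5
        (by intro a ha
            have hm : (a, ((k : Int) + 1)) ∈ dist₁.items := by
              rw [o4]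
              exact List.mem_append_right _ (List.mem_map.mpr ⟨a, ha, rfl⟩)
            have h := PySem.Dict.get?_of_mem_items _ hm o5
            push_cast
            exact h)
        (by refine ⟨dist.items, ?_, ?_⟩
            · push_cast
              exact o4
            · intro p hp
              obtain ⟨low, hitems, hlt⟩ := hlow
              rw [hitems] at hp
              rcases List.mem_append.mp hp with h | h
              · have := hlt p h; push_cast; omega
              · obtain ⟨a, _, rfl⟩ := List.mem_map.mp h
                push_cast; omega)
    refine ⟨F.length + m₂, dist', ?_, ?_, ind, ?_, ?_⟩
    · intro f
      have hfe : f + (F.length + m₂) = (f + m₂) + F.length := by omega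
      have o1' := o1 (f + m₂)
      rw [List.append_nil, List.nil_append] at o1'
      rw [hfe, o1']
      exact i1 f
    · have hsz : dist₁.size = dist.size + new₁.length := by
        simp only [PySem.Dict.size, o4, List.length_append, List.length_map]
      omega
    · intro x hx
      rcases i3 x hx with h | h
      · rw [hk1] at h
        rcases List.mem_append.mp h with h' | h'
        · exact Or.inl h'
        · exact Or.inr (o6 x h')
      · exact Or.inr h
    · rw [Function.iterate_succ_apply]
      show _ = ((fun st => pvAddNewLevel db st.1 st.2)^[r] (pvAddNewLevel db F bt)).1
      rw [hround]
      exact i4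

-- ===== VERDICT (by name: the statement is the Claim_ definition above) =====
theorem get_actors_with_bacon_number_spec : Claim_equal_get_actors_with_bacon_number := by
  intro data n _ _
  unfold Spec_get_actors_with_bacon_number
  by_cases hn : 0 ≤ n
  · show ((PySem.List.pyRange 0 n 1).foldl
        (fun st _ => pvAddNewLevel (pvMakeDataDict data) st.1 st.2)
        (PySem.Set.ofList [4724],
          (PySem.Dict.empty : PySem.Dict Int (Option Int)).insert 4724 none)).1
      = PySem.Set.ofList (((pvBfs (pvAltDb data) n (2 * data.length + 2) [4724]
          ((PySem.Dict.empty : PySem.Dict Int Int).insert 4724 0)).items.filter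
          (fun p => p.2 ≥ n)).map (fun p => p.1))
    rw [pvAltDb_eq]
    obtain ⟨m, dist', c1, c2, cnd, c3, c4⟩ :=
      pvLevels (pvMakeDataDict data) n hn (data.flatMap (fun p => [p.1, p.2]))
        (pvMakeDataDict_sub data) n.toNat 0 (by omega) [4724]
        ((PySem.Dict.empty : PySem.Dict Int (Option Int)).insert 4724 none)
        ((PySem.Dict.empty : PySem.Dict Int Int).insert 4724 0)
        (by decide) (by decide)
        (by intro a ha
            rw [List.mem_singleton] at ha
            subst ha
            rw [PySem.Dict.get?_insert_self]
            norm_num)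
        ⟨[], by decide, by simp⟩
    have hsz : dist'.size = dist'.keys.length := by
      simp [PySem.Dict.size, PySem.Dict.keys]
    have hsub : dist'.keys ⊆ 4724 :: data.flatMap (fun p => [p.1, p.2]) := by
      intro x hx
      rcases c3 x hx with h | h
      · have hkk : ((PySem.Dict.empty : PySem.Dict Int Int).insert 4724 0).keys
            = [(4724 : Int)] := by decide
        rw [hkk, List.mem_singleton] at h
        subst h
        exact List.mem_cons_self
      · exact List.mem_cons_of_mem _ h
    have hle : dist'.keys.length ≤ 2 * data.length + 1 := by
      have := (List.subperm_of_subset cnd hsub).length_le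
      simpa [pvFlatMap_len data] using this
    have hm : m ≤ 2 * data.length + 2 := by
      have h1 : ((PySem.Dict.empty : PySem.Dict Int Int).insert 4724 0).size = 1 := by decide
      have h2 : ([(4724 : Int)]).length = 1 := by decide
      rw [h1, h2, hsz] at c2
      omega
    have hbfs : pvBfs (pvMakeDataDict data) n (2 * data.length + 2) [4724]
        ((PySem.Dict.empty : PySem.Dict Int Int).insert 4724 0) = dist' := by
      rw [show 2 * data.length + 2 = (2 * data.length + 2 - m) + m from by omega]
      exact c1 _
    rw [hbfs]
    have hfold : (PySem.List.pyRange 0 n 1).foldl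
        (fun st _ => pvAddNewLevel (pvMakeDataDict data) st.1 st.2)
        (PySem.Set.ofList [4724],
          (PySem.Dict.empty : PySem.Dict Int (Option Int)).insert 4724 none)
        = (fun st => pvAddNewLevel (pvMakeDataDict data) st.1 st.2)^[n.toNat]
          ([4724], (PySem.Dict.empty : PySem.Dict Int (Option Int)).insert 4724 none) := by
      rw [pvFoldl_const]
      rw [show PySem.Set.ofList [(4724 : Int)] = [4724] from by decide]
      congr 1
      rw [PySem.List.length_pyRange_one]
      omega
    have hnodup : ((dist'.items.filter (fun p => p.2 ≥ n)).map (fun p => p.1)).Nodup := by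
      refine List.Nodup.sublist ?_ cnd
      have h1 : List.Sublist ((dist'.items.filter (fun p => p.2 ≥ n)).map (fun p => p.1))
          (dist'.items.map (fun p => p.1)) :=
        List.Sublist.map _ List.filter_sublist
      simpa [PySem.Dict.keys] using h1
    rw [PySem.Set.ofList_eq_self_of_nodup _ hnodup, c4, hfold]
  · -- n < 0: A's counting loop never runs ([4724]); B's BFS never expands and the
    -- seed's distance 0 ≥ n, so both return [4724]
    have hA : get_actors_with_bacon_number data n = [4724] := by
      unfold get_actors_with_bacon_number
      have hr : PySem.List.pyRange 0 n 1 = [] := by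
        rw [PySem.List.pyRange_one]
        rw [show (n - 0).toNat = 0 from by omega]
        simp
      rw [hr]
      simp only [List.foldl_nil]
      decide
    have hB : get_actors_with_bacon_number_alt data n = [4724] := by
      show PySem.Set.ofList (((pvBfs (pvAltDb data) n (2 * data.length + 2) [4724]
          ((PySem.Dict.empty : PySem.Dict Int Int).insert 4724 0)).items.filter
          (fun p => p.2 ≥ n)).map (fun p => p.1)) = [4724]
      have hg : ((PySem.Dict.empty : PySem.Dict Int Int).insert 4724 0).getD 4724 0 = 0 := by
        decide
      have h1 : pvBfs (pvAltDb data) n (2 * data.length + 2) [4724]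
          ((PySem.Dict.empty : PySem.Dict Int Int).insert 4724 0)
          = (PySem.Dict.empty : PySem.Dict Int Int).insert 4724 0 := by
        show pvBfs (pvAltDb data) n ((2 * data.length + 1) + 1) (4724 :: [])
          ((PySem.Dict.empty : PySem.Dict Int Int).insert 4724 0) = _
        rw [pvBfs, hg, if_neg (by omega : ¬ ((0 : Int) < n))]
        show pvBfs (pvAltDb data) n ((2 * data.length) + 1) [] _ = _
        rw [pvBfs]
      rw [h1]
      rw [show ((PySem.Dict.empty : PySem.Dict Int Int).insert 4724 0).items
          = [((4724 : Int), (0 : Int))] from by decide]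
      have h2 : ((0 : Int) ≥ n) := by omega
      simp [h2]
      decide
    rw [hA, hB]
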